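-- pv_equiv track=rewrite | github.com/TriggerJames/alx-frontend-for-fun | markdown2html.py | convert_ordered_list
-- ===== SOURCE A (Python) =====
-- def convert_ordered_list(lines):
--     """
--     Convert Markdown ordered lists to HTML ordered lists.
--     """
--     html_lines = []
--     inside_olist = False
--     for line in lines:
--         if line.startswith('* '):
--             if not inside_olist:
--                 html_lines.append("<ol>")
--                 inside_olist = True
--             html_lines.append(f"<li>{line[2:].strip()}</li>")
--         else:
--             if inside_olist:
--                 html_lines.append("</ol>")
--                 inside_olist = False
--             html_lines.append(line)
--     if inside_olist:
--         html_lines.append("</ol>")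
--     return html_lines
-- ===== SOURCE B (Python) =====
-- def convert_ordered_list(lines):
--     """
--     Convert Markdown ordered lists to HTML ordered lists.
--
--     Run-based: scan each maximal run of '* ' lines and wrap it in <ol>…</ol>.
--     """
--     out = []
--     i = 0
--     n = len(lines)
--     while i < n:
--         if lines[i].startswith('* '):
--             j = i
--             while j < n and lines[j].startswith('* '):
--                 j += 1
--             out.append("<ol>")
--             for k in range(i, j):
--                 out.append(f"<li>{lines[k][2:].strip()}</li>")
--             out.append("</ol>")
--             i = j
--         else:
--             out.append(lines[i])
--             i += 1
--     return out
-- ===== Notes on version B (the rewrite author's own statement) =====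
-- stated objective: alternative
-- what changed: Replaces A's single pass with an inside_olist state flag by run-based grouping: an outer loop that scans each maximal run of '* ' lines and wraps it in <ol>...</ol>, with no state flag and no trailing-close fixup.
import Mathlib
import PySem

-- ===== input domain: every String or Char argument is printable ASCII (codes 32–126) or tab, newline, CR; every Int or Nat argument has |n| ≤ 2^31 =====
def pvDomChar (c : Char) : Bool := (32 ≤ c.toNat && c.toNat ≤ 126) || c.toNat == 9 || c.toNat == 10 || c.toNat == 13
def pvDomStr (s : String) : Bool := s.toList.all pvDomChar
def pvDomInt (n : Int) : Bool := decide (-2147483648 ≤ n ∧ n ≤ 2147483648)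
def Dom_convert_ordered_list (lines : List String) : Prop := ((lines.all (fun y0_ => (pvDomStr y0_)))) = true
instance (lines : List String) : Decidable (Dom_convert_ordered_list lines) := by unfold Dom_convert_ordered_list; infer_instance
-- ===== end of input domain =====

-- B replaces A's inside_olist state flag by run-based grouping (scan each maximal '* ' run and wrap it); alternative decomposition, same output.

-- f"<li>{line[2:].strip()}</li>"  (shared by both sources, which contain this exact expression)
def pvItem (line : String) : String :=
  String.ofList (('<'::'l'::'i'::'>'::[]) ++
    PySem.Chars.strip (PySem.Chars.slice line.toList (some 2) none) ++
    ('<'::'/'::'l'::'i'::'>'::[]))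

-- line.startswith('* ')
def pvIsItem (line : String) : Bool := PySem.Str.startswith line "* "

-- ===== PORT A =====
-- the for-loop with state (html_lines, inside_olist), as tail recursion
def goA (ls : List String) (acc : List String) (inside : Bool) : List String :=
  match ls with
  | [] => if inside then acc ++ ["</ol>"] else acc
  | line :: rest =>
    if pvIsItem line then
      let acc1 := if !inside then acc ++ ["<ol>"] else acc
      goA rest (acc1 ++ [pvItem line]) true
    else
      let acc1 := if inside then acc ++ ["</ol>"] else acc
      goA rest (acc1 ++ [line]) false

def convert_ordered_list (lines : List String) : List String :=
  goA lines [] false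

-- ===== PORT B =====
-- outer scan: on a '* ' head, take the maximal run, wrap it, continue after it
def goB (ls : List String) : List String :=
  match ls with
  | [] => []
  | l :: rest =>
    if h : pvIsItem l then
      ("<ol>" :: (List.takeWhile pvIsItem (l :: rest)).map pvItem ++ ["</ol>"]) ++
        goB (List.dropWhile pvIsItem (l :: rest))
    else
      l :: goB rest
termination_by ls.length
decreasing_by
  · simp [List.dropWhile, h]
    exact List.length_dropWhile_le _ _
  · simp

def convert_ordered_list_alt (lines : List String) : List String :=
  goB lines

-- ===== PRECONDITION & SPEC =====
def Spec_convert_ordered_list (lines : List String) (out : List String) : Prop := out = convert_ordered_list_alt lines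
instance (lines : List String) (out : List String) : Decidable (Spec_convert_ordered_list lines out) := by unfold Spec_convert_ordered_list; infer_instance

-- ===== CLAIM (what is proved, stated in full; the proofs are below) =====
def Claim_equal_convert_ordered_list : Prop := ∀ (lines : List String), Dom_convert_ordered_list lines → Spec_convert_ordered_list lines (convert_ordered_list lines)

-- ===== LEMMAS AND PROOFS =====

theorem goA_acc (ls : List String) (acc : List String) (inside : Bool) :
    goA ls acc inside = acc ++ goA ls [] inside := by
  induction ls generalizing acc inside with
  | nil => cases inside <;> simp [goA]
  | cons l rest ih =>
    by_cases h : pvIsItem l = true <;> cases inside <;>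
      simp [goA, h] <;> rw [ih] <;> (conv_rhs => rw [ih]) <;> simp


theorem goA_eq_goB (ls : List String) :
    goA ls [] false = goB ls ∧
      goA ls [] true =
        (List.takeWhile pvIsItem ls).map pvItem ++ "</ol>" :: goB (List.dropWhile pvIsItem ls) := by
  induction ls with
  | nil => simp [goA, goB]
  | cons l rest ih =>
    by_cases h : pvIsItem l = true
    · constructor
      · rw [show goA (l :: rest) [] false = goA rest (["<ol>"] ++ [pvItem l]) true by
              simp [goA, h]]
        rw [goA_acc, ih.2]
        simp [goB, h, List.takeWhile, List.dropWhile]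
      · rw [show goA (l :: rest) [] true = goA rest ([] ++ [pvItem l]) true by
              simp [goA, h]]
        rw [goA_acc, ih.2]
        simp [List.takeWhile, h]
    · constructor
      · rw [show goA (l :: rest) [] false = goA rest ([] ++ [l]) false by simp [goA, h]]
        rw [goA_acc, ih.1]
        simp [goB, h]
      · rw [show goA (l :: rest) [] true = goA rest (["</ol>"] ++ [l]) false by
              simp [goA, h]]
        rw [goA_acc, ih.1]
        simp [goB, h, List.takeWhile, List.dropWhile]

-- ===== VERDICT (by name: the statement is the Claim_ definition above) =====
theorem convert_ordered_list_spec : Claim_equal_convert_ordered_list := by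
  intro lines _
  unfold Spec_convert_ordered_list convert_ordered_list convert_ordered_list_alt
  exact (goA_eq_goB lines).1
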